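-- pv_equiv track=rewrite | github.com/latra/AutomatsYLlenguatges | min.py | get_min_final
-- ===== SOURCE A (Python) =====
-- def get_min_final(equivalecy, finales):
--     #Revisa cual (o cuales) de los conjuntos de status contienen algún transition final del AFD original y los devuelve
--     minimized_final_status = []
--     for status in equivalecy:
--         for final in finales:
--             if final in status:
--                 minimized_final_status.append(status)
--                 break
--     return minimized_final_status
-- ===== SOURCE B (Python) =====
-- def get_min_final(equivalecy, finales):
--     # reversed traversal: hash-set of final states, collect indices of hit
--     # classes via enumerate, then emit those classes in original order
--     fin = set(finales)
--     hit = {i for i, status in enumerate(equivalecy) for s in status if s in fin}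
--     return [equivalecy[i] for i in sorted(hit)]
-- ===== Notes on version B (the rewrite author's own statement) =====
-- stated objective: faster
-- what changed: Instead of rescanning the finales list inside a per-class loop with break, B builds a hash set of final states once, collects the indices of hit classes via a set comprehension over enumerate, and emits the classes at the sorted indices.
import Mathlib
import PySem

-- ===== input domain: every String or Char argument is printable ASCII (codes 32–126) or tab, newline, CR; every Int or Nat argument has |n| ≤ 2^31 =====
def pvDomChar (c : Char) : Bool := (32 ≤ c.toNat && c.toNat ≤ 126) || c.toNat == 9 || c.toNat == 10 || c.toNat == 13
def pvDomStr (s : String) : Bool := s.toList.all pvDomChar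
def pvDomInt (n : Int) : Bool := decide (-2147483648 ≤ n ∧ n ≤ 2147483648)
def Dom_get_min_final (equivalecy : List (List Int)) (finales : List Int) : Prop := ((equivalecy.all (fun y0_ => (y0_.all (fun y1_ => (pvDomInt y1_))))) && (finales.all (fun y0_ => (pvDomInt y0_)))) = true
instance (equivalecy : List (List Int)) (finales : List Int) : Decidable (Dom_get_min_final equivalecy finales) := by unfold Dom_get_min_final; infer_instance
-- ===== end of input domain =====

-- B replaces A's per-class rescan of finales by a final-state set, a set of hit class
-- indices collected over enumerate, and a sorted-index readback (alternative traversal).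

-- ===== PORT A =====
-- inner 'for final in finales: if final in status: …; break' as a helper returning whether the break fired
def pvFindFinal : List Int → List Int → Bool
  | [], _ => false
  | f :: rest, status => if status.contains f then true else pvFindFinal rest status

def get_min_final (equivalecy : List (List Int)) (finales : List Int) : List (List Int) :=
  equivalecy.foldl
    (fun acc status => if pvFindFinal finales status then acc ++ [status] else acc) []

-- ===== PORT B =====
def get_min_final_alt (equivalecy : List (List Int)) (finales : List Int) : List (List Int) :=
  let fin : PySem.Set Int := PySem.Set.ofList finales
  let hit : PySem.Set Int :=
    (PySem.List.enumerate equivalecy).foldl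
      (fun h p => p.2.foldl (fun h' s => if PySem.Set.contains fin s then PySem.Set.add h' p.1 else h') h)
      PySem.Set.empty
  -- equivalecy[i]: i is a valid nonnegative index (it came from enumerate), so pyGetD is exact here
  (PySem.List.sorted hit (fun i => i) false).map (fun i => PySem.List.pyGetD equivalecy i [])

-- ===== PRECONDITION & SPEC =====
def Spec_get_min_final (equivalecy : List (List Int)) (finales : List Int) (out : List (List Int)) : Prop := out = get_min_final_alt equivalecy finales
instance (equivalecy : List (List Int)) (finales : List Int) (out : List (List Int)) : Decidable (Spec_get_min_final equivalecy finales out) := by unfold Spec_get_min_final; infer_instance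

-- ===== CLAIM (what is proved, stated in full; the proofs are below) =====
def Claim_equal_get_min_final : Prop := ∀ (equivalecy : List (List Int)) (finales : List Int), Dom_get_min_final equivalecy finales → Spec_get_min_final equivalecy finales (get_min_final equivalecy finales)

-- ===== LEMMAS AND PROOFS =====

theorem pvFindFinal_eq_any (fs s : List Int) :
    pvFindFinal fs s = fs.any (fun f => s.contains f) := by
  induction fs with
  | nil => rfl
  | cons f rest ih => by_cases h : s.contains f <;> simp [pvFindFinal, ih]

-- the two directions of scanning decide the same "s meets fs" test
theorem any_contains_swap (fs s : List Int) :
    fs.any (fun f => s.contains f) = s.any (fun x => PySem.Set.contains (PySem.Set.ofList fs) x) := by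
  rw [Bool.eq_iff_iff]
  simp only [List.any_eq_true, PySem.Set.contains_eq_listContains, List.contains_eq_mem,
    decide_eq_true_eq]
  constructor
  · rintro ⟨f, hf, hfs⟩; exact ⟨f, hfs, (PySem.Set.mem_ofList fs f).mpr hf⟩
  · rintro ⟨x, hx, hxf⟩; exact ⟨x, (PySem.Set.mem_ofList fs x).mp hxf, hx⟩

-- inner loop of B: membership in the accumulated set
theorem mem_inner_foldl (c : Int → Bool) (j : Int) (st : List Int) :
    ∀ (h : PySem.Set Int) (i : Int),
      i ∈ st.foldl (fun h' s => if c s then PySem.Set.add h' j else h') h ↔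
        i ∈ h ∨ (st.any c ∧ i = j) := by
  induction st with
  | nil => simp
  | cons s rest ih =>
      intro h i
      by_cases hc : c s
      · simp only [List.foldl_cons, hc, if_pos]
        rw [ih]
        simp [PySem.Set.mem_add, hc]
        tauto
      · simp only [List.foldl_cons, if_neg hc]
        rw [ih]
        simp [hc]

theorem nodup_inner_foldl (c : Int → Bool) (j : Int) (st : List Int) :
    ∀ (h : PySem.Set Int), h.Nodup →
      (st.foldl (fun h' s => if c s then PySem.Set.add h' j else h') h).Nodup := by
  induction st with
  | nil => intro h hh; simpa
  | cons s rest ih =>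
      intro h hh
      by_cases hc : c s
      · simp only [List.foldl_cons, hc, if_pos]
        exact ih _ (PySem.Set.nodup_add h j hh)
      · simp only [List.foldl_cons, if_neg hc]
        exact ih _ hh

-- outer loop of B over the enumerated classes
theorem mem_outer_foldl (c : Int → Bool) (l : List (Int × List Int)) :
    ∀ (h : PySem.Set Int) (i : Int),
      i ∈ l.foldl (fun h p => p.2.foldl (fun h' s => if c s then PySem.Set.add h' p.1 else h') h) h ↔
        i ∈ h ∨ ∃ p ∈ l, p.2.any c ∧ i = p.1 := by
  induction l with
  | nil => simp
  | cons p rest ih =>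
      intro h i
      simp only [List.foldl_cons]
      rw [ih, mem_inner_foldl]
      simp only [List.mem_cons]
      constructor
      · rintro (( hih | ⟨ha, rfl⟩) | ⟨q, hq, hqa, rfl⟩)
        · exact Or.inl hih
        · exact Or.inr ⟨p, Or.inl rfl, ha, rfl⟩
        · exact Or.inr ⟨q, Or.inr hq, hqa, rfl⟩
      · rintro (hih | ⟨q, (rfl | hq), hqa, rfl⟩)
        · exact Or.inl (Or.inl hih)
        · exact Or.inl (Or.inr ⟨hqa, rfl⟩)
        · exact Or.inr ⟨q, hq, hqa, rfl⟩

theorem nodup_outer_foldl (c : Int → Bool) (l : List (Int × List Int)) :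
    ∀ (h : PySem.Set Int), h.Nodup →
      (l.foldl (fun h p => p.2.foldl (fun h' s => if c s then PySem.Set.add h' p.1 else h') h) h).Nodup := by
  induction l with
  | nil => intro h hh; simpa
  | cons p rest ih =>
      intro h hh
      simp only [List.foldl_cons]
      exact ih _ (nodup_inner_foldl _ _ _ _ hh)

-- map snd commutes with a filter whose test only reads snd
theorem map_snd_filter_snd {α β : Type} (q : β → Bool) (l : List (α × β)) :
    ((l.filter (fun p => q p.2)).map (fun p => p.2)) = (l.map (fun p => p.2)).filter q := by
  induction l with
  | nil => rfl
  | cons p rest ih =>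
      by_cases h : q p.2 <;> simp [h, ih]

theorem get_min_final_spec' (equivalecy : List (List Int)) (finales : List Int) :
    get_min_final equivalecy finales = get_min_final_alt equivalecy finales := by
  unfold get_min_final
  simp only [get_min_final_alt]
  set c : Int → Bool := fun x => PySem.Set.contains (PySem.Set.ofList finales) x with hc
  -- A side: filter
  have hA : equivalecy.foldl
      (fun acc status => if pvFindFinal finales status then acc ++ [status] else acc) [] =
      equivalecy.filter (fun s => s.any c) := by
    have := PySem.List.foldl_append_if_eq_filter
      (l := equivalecy) (p := fun s => pvFindFinal finales s) (acc := [])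
    rw [this]
    simp only [List.nil_append]
    apply List.filter_congr
    intro s _
    rw [pvFindFinal_eq_any, any_contains_swap]
  rw [hA]
  -- B side
  set L : List Int :=
    ((PySem.List.enumerate equivalecy).filter (fun p => p.2.any c)).map (fun p => p.1) with hL
  have hsorted :
      PySem.List.sorted
        ((PySem.List.enumerate equivalecy).foldl
          (fun h p => p.2.foldl (fun h' s => if c s then PySem.Set.add h' p.1 else h') h)
          PySem.Set.empty) (fun i => i) false = L := by
    apply PySem.List.sorted_eq_of_perm_of_pairwise_lt
    · -- L ~ hit
      have hnodL : L.Nodup := by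
        have hpl : L.Pairwise (· < ·) := by
          apply List.Pairwise.map
          · exact fun a b hab => hab
          · exact (PySem.List.pairwise_lt_enumerate equivalecy 0).filter _
        exact hpl.imp (fun h => ne_of_lt h)
      have hnodH := nodup_outer_foldl c (PySem.List.enumerate equivalecy) PySem.Set.empty
        (by simp [PySem.Set.empty])
      rw [List.perm_ext_iff_of_nodup hnodL hnodH]
      intro i
      rw [mem_outer_foldl]
      simp only [hL, List.mem_map, List.mem_filter, PySem.Set.empty]
      constructor
      · rintro ⟨p, ⟨hp, hpa⟩, rfl⟩; exact Or.inr ⟨p, hp, hpa, rfl⟩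
      · rintro (h | ⟨p, hp, hpa, rfl⟩)
        · simp at h
        · exact ⟨p, ⟨hp, hpa⟩, rfl⟩
    · -- L strictly increasing
      apply List.Pairwise.map
      · exact fun a b hab => hab
      · exact (PySem.List.pairwise_lt_enumerate equivalecy 0).filter _
  rw [hsorted, hL, List.map_map]
  have hread : (((PySem.List.enumerate equivalecy).filter (fun p => p.2.any c)).map
      ((fun i => PySem.List.pyGetD equivalecy i []) ∘ (fun p => p.1))) =
      ((PySem.List.enumerate equivalecy).filter (fun p => p.2.any c)).map (fun p => p.2) := by
    apply List.map_congr_left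
    intro p hp
    have hpm : p ∈ PySem.List.enumerate equivalecy := (List.mem_filter.mp hp).1
    obtain ⟨k, hk, rfl⟩ := (PySem.List.mem_enumerate_iff equivalecy 0 p).mp hpm
    simp [PySem.List.pyGetD_natCast, hk]
  rw [hread, map_snd_filter_snd (fun (b : List Int) => b.any c) (PySem.List.enumerate equivalecy), PySem.List.map_snd_enumerate]

-- ===== VERDICT (by name: the statement is the Claim_ definition above) =====
theorem get_min_final_spec : Claim_equal_get_min_final := by
  intro equivalecy finales _
  unfold Spec_get_min_final
  exact get_min_final_spec' equivalecy finales
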